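-- pv_equiv track=rewrite | github.com/walterincorg/funnel-intel | backend/worker/traversal.py | _extract_question_text
-- ===== SOURCE A (Python) =====
-- def _extract_question_text(lines: list[str]) -> str | None:
--     for line in lines[:80]:
--         if len(line) < 8 or len(line) > 180:
--             continue
--         if "?" in line:
--             return line
--     for line in lines[:80]:
--         lower = line.lower()
--         if any(token in lower for token in ("what ", "which ", "how ", "select ", "choose ", "tell us")):
--             return line
--     return None
-- ===== SOURCE B (Python) =====
-- def _extract_question_text(lines: list[str]) -> str | None:
--     # single pass: remember first token-match as fallback, return first valid '?'-line immediately
--     fallback = None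
--     for line in lines[:80]:
--         if fallback is None:
--             low = line.lower()
--             if any(t in low for t in ("what ", "which ", "how ", "select ", "choose ", "tell us")):
--                 fallback = line
--         if 8 <= len(line) <= 180 and "?" in line:
--             return line
--     return fallback
-- ===== Notes on version B (the rewrite author's own statement) =====
-- stated objective: alternative
-- what changed: Replaces A's two sequential scans of lines[:80] by a single pass that records the first token-matching line as a fallback while returning the first valid '?'-line immediately.
import Mathlib
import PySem

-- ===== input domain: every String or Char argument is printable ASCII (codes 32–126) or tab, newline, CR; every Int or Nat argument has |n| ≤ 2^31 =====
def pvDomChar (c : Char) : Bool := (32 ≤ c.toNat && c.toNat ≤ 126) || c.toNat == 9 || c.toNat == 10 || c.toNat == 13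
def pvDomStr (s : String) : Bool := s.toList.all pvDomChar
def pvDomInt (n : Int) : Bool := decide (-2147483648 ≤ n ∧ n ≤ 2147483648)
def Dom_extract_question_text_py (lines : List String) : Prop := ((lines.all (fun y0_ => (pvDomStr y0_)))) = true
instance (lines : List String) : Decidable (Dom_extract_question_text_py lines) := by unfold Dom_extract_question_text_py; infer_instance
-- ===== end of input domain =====

-- B is a single pass over lines[:80] (fallback recorded on the fly) instead of A's two scans; objective: alternative decomposition, same cost.

-- ===== PORT A =====
def pvTokens : List String := ["what ", "which ", "how ", "select ", "choose ", "tell us"]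

def pvTokenMatch (l : String) : Bool :=
  pvTokens.any (fun t => PySem.Str.isIn t (PySem.Str.lower l))

-- first for-loop of A
def pvAPass1 : List String → Option String
  | [] => none
  | l :: rest =>
    if PySem.Str.len l < 8 || PySem.Str.len l > 180 then pvAPass1 rest
    else if PySem.Str.isIn "?" l then some l
    else pvAPass1 rest

-- second for-loop of A
def pvAPass2 : List String → Option String
  | [] => none
  | l :: rest =>
    if pvTokenMatch l then some l else pvAPass2 rest

def extract_question_text_py (lines : List String) : Option String :=
  let xs := PySem.List.slice lines none (some 80)
  match pvAPass1 xs with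
  | some l => some l
  | none => pvAPass2 xs

-- ===== PORT B =====
def pvBLoop : List String → Option String → Option String
  | [], fb => fb
  | l :: rest, fb =>
    let fb' := if fb.isNone && pvTokenMatch l then some l else fb
    if 8 ≤ PySem.Str.len l && PySem.Str.len l ≤ 180 && PySem.Str.isIn "?" l then some l
    else pvBLoop rest fb'

def extract_question_text_py_alt (lines : List String) : Option String :=
  pvBLoop (PySem.List.slice lines none (some 80)) none

-- ===== PRECONDITION & SPEC =====
def Spec_extract_question_text_py (lines : List String) (out : Option String) : Prop := out = extract_question_text_py_alt lines
instance (lines : List String) (out : Option String) : Decidable (Spec_extract_question_text_py lines out) := by unfold Spec_extract_question_text_py; infer_instance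

-- ===== CLAIM (what is proved, stated in full; the proofs are below) =====
def Claim_equal_extract_question_text_py : Prop := ∀ (lines : List String), Dom_extract_question_text_py lines → Spec_extract_question_text_py lines (extract_question_text_py lines)

-- ===== LEMMAS AND PROOFS =====
theorem pvBLoop_eq (xs : List String) : ∀ fb : Option String,
    pvBLoop xs fb =
      match pvAPass1 xs with
      | some l => some l
      | none => match fb with
                | some f => some f
                | none => pvAPass2 xs := by
  induction xs with
  | nil => intro fb; cases fb <;> simp [pvBLoop, pvAPass1, pvAPass2]
  | cons l rest ih =>
    intro fb
    simp only [pvBLoop, pvAPass1, pvAPass2]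
    by_cases hq : (8 ≤ PySem.Str.len l && PySem.Str.len l ≤ 180 && PySem.Str.isIn "?" l) = true
    · have h1 : ¬ (PySem.Str.len l < 8 || PySem.Str.len l > 180) = true := by
        simp only [Bool.and_eq_true, decide_eq_true_eq] at hq ⊢
        simp only [Bool.or_eq_true, decide_eq_true_eq]
        omega
      simp only [hq, if_true, h1]
      have h2 : PySem.Str.isIn "?" l = true := by
        simp only [Bool.and_eq_true] at hq; exact hq.2
      have h2' : PySem.Chars.isIn ['?'] l.toList = true := by simpa using h2
      simp [h2']
    · simp only [hq]
      rw [ih]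
      by_cases h1 : (PySem.Str.len l < 8 || PySem.Str.len l > 180) = true
      · simp only [h1, if_true]
        cases fb with
        | some f => simp
        | none =>
          by_cases ht : pvTokenMatch l = true <;> simp [ht]
      · -- length in range, so "?" must fail
        have h2 : PySem.Str.isIn "?" l = false := by
          cases h : PySem.Str.isIn "?" l
          · rfl
          · exfalso; apply hq
            simp only [Bool.or_eq_true, decide_eq_true_eq] at h1
            simp only [Bool.and_eq_true, decide_eq_true_eq]
            exact ⟨⟨by omega, by omega⟩, h⟩
        simp only [h1, if_false, h2, Bool.false_eq_true, if_false]
        cases fb with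
        | some f => simp
        | none =>
          by_cases ht : pvTokenMatch l = true <;> simp [ht]

-- ===== VERDICT (by name: the statement is the Claim_ definition above) =====
theorem extract_question_text_py_spec : Claim_equal_extract_question_text_py := by
  intro lines _
  unfold Spec_extract_question_text_py extract_question_text_py extract_question_text_py_alt
  rw [pvBLoop_eq]
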